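-- pv_equiv track=rewrite | github.com/egovernments/helm-charts | helmfile_deploy.py | parse_selection_input
-- ===== SOURCE A (Python) =====
-- def parse_selection_input(user_input, max_index):
--     user_input = user_input.strip().lower()
--     if not user_input:
--         return []
--     if user_input == "all":
--         return list(range(1, max_index + 1))
--     parts = [p.strip() for p in user_input.split(",") if p.strip()]
--     selected = set()
--     for part in parts:
--         if "-" in part:
--             a, b = part.split("-", 1)
--             try:
--                 a_i = int(a); b_i = int(b)
--             except ValueError:
--                 continue
--             if a_i > b_i:
--                 a_i, b_i = b_i, a_i
--             for i in range(a_i, min(b_i, max_index) + 1):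
--                 if 1 <= i <= max_index:
--                     selected.add(i)
--         else:
--             try:
--                 v = int(part)
--             except ValueError:
--                 continue
--             if 1 <= v <= max_index:
--                 selected.add(v)
--     return sorted(selected)
-- ===== SOURCE B (Python) =====
-- def parse_selection_input(user_input, max_index):
--     user_input = user_input.strip().lower()
--     if not user_input:
--         return []
--     if user_input == "all":
--         return list(range(1, max_index + 1))
--     ivs = []
--     for piece in user_input.split(","):
--         part = piece.strip()
--         if not part:
--             continue
--         if "-" in part:
--             a, b = part.split("-", 1)
--             try:
--                 lo = int(a); hi = int(b)
--             except ValueError: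
--                 continue
--             if lo > hi:
--                 lo, hi = hi, lo
--         else:
--             try:
--                 lo = int(part)
--             except ValueError:
--                 continue
--             hi = lo
--         lo = max(lo, 1)
--         hi = min(hi, max_index)
--         if lo <= hi:
--             ivs.append((lo, hi))
--     ivs.sort(key=lambda iv: iv[0])
--     res = []
--     cur = 0
--     for lo, hi in ivs:
--         res.extend(range(max(lo, cur + 1), hi + 1))
--         cur = max(cur, hi)
--     return res
-- ===== Notes on version B (the rewrite author's own statement) =====
-- stated objective: alternative
-- what changed: B no longer materialises every selected index into a set and sorts it: it collects one (lo,hi) interval per parsed part and produces the result already in order by a single scan of 1..max_index testing interval membership.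
import Mathlib
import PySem

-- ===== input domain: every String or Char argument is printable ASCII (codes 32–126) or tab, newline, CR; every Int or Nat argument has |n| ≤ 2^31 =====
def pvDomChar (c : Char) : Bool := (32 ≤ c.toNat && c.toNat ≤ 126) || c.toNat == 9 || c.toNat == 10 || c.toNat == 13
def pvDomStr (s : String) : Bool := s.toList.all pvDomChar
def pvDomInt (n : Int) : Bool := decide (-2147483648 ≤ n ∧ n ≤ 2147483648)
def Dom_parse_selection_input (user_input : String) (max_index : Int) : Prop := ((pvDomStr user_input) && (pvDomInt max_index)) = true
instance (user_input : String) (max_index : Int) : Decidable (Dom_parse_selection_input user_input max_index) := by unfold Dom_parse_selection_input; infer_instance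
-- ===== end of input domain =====

-- B replaces A's element-by-element set filling + final sort by collecting one clipped (lo,hi)
-- interval per parsed part, sorting the intervals by their left end and emitting the result
-- directly in order with a single merge sweep (alternative structure).


-- ===== PORT A =====
-- the body of A's 'for part in parts' loop (verbatim branch structure)
def pvStepA (max_index : Int) (sel : PySem.Set Int) (part : String) : PySem.Set Int :=
  if PySem.Str.isIn "-" part then
    match (PySem.Str.splitMax? part "-" 1).getD [] with
    | [a, b] =>
      match PySem.Int.ofStr? a, PySem.Int.ofStr? b with
      | some a0, some b0 =>
        let a_i := if a0 > b0 then b0 else a0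
        let b_i := if a0 > b0 then a0 else b0
        (PySem.List.pyRange a_i (min b_i max_index + 1)).foldl
          (fun sel i => if 1 ≤ i ∧ i ≤ max_index then sel.add i else sel) sel
      | _, _ => sel
    | _ => sel
  else
    match PySem.Int.ofStr? part with
    | some v => if 1 ≤ v ∧ v ≤ max_index then sel.add v else sel
    | none => sel

def parse_selection_input (user_input : String) (max_index : Int) : List Int :=
  let s := PySem.Str.lower (PySem.Str.strip user_input)
  if PySem.Str.len s = 0 then []
  else if s = "all" then PySem.List.pyRange 1 (max_index + 1)
  else
    let parts := (((PySem.Str.split? s ",").getD []).map PySem.Str.strip).filter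
      (fun p => PySem.Str.len p ≠ 0)
    let selected := parts.foldl (pvStepA max_index) PySem.Set.empty
    PySem.List.sorted selected (fun x => x)

-- ===== PORT B =====
-- the parsed interval of a single stripped, non-empty part ([] when parsing fails);
-- this is exactly B's "-"/int branch pair (and coincides with A's parsing, as in the Pythons)
def pvIval (part : String) : List (Int × Int) :=
  if PySem.Str.isIn "-" part then
    match (PySem.Str.splitMax? part "-" 1).getD [] with
    | [a, b] =>
      match PySem.Int.ofStr? a, PySem.Int.ofStr? b with
      | some lo, some hi => if lo > hi then [(hi, lo)] else [(lo, hi)]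
      | _, _ => []
    | _ => []
  else
    match PySem.Int.ofStr? part with
    | some v => [(v, v)]
    | none => []

-- the body of B's 'for piece in user_input.split(",")' loop: parse, clip to [1, max_index], keep
def pvStepB (max_index : Int) (acc : List (Int × Int)) (piece : String) : List (Int × Int) :=
  let part := PySem.Str.strip piece
  if PySem.Str.len part = 0 then acc
  else
    match pvIval part with
    | [(lo, hi)] =>
      if max lo 1 ≤ min hi max_index then acc ++ [(max lo 1, min hi max_index)] else acc
    | _ => acc

-- the body of B's sweep loop: state = (res, cur)
def pvSweepStep (rc : List Int × Int) (iv : Int × Int) : List Int × Int :=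
  (rc.1 ++ PySem.List.pyRange (max iv.1 (rc.2 + 1)) (iv.2 + 1), max rc.2 iv.2)

def parse_selection_input_alt (user_input : String) (max_index : Int) : List Int :=
  let s := PySem.Str.lower (PySem.Str.strip user_input)
  if PySem.Str.len s = 0 then []
  else if s = "all" then PySem.List.pyRange 1 (max_index + 1)
  else
    let ivs := ((PySem.Str.split? s ",").getD []).foldl (pvStepB max_index) []
    let ivs := PySem.List.sorted ivs (fun iv => iv.1)
    (ivs.foldl pvSweepStep ([], 0)).1

-- ===== PRECONDITION & SPEC =====
def Spec_parse_selection_input (user_input : String) (max_index : Int) (out : List Int) : Prop := out = parse_selection_input_alt user_input max_index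
instance (user_input : String) (max_index : Int) (out : List Int) : Decidable (Spec_parse_selection_input user_input max_index out) := by unfold Spec_parse_selection_input; infer_instance

-- ===== CLAIM (what is proved, stated in full; the proofs are below) =====
def Claim_equal_parse_selection_input : Prop := ∀ (user_input : String) (max_index : Int), Dom_parse_selection_input user_input max_index → Spec_parse_selection_input user_input max_index (parse_selection_input user_input max_index)

-- ===== LEMMAS AND PROOFS =====

-- membership in A's inner guarded-add fold over a range
theorem pv_mem_guard_fold (mi : Int) (l : List Int) (sel : PySem.Set Int) (x : Int) :
    x ∈ l.foldl (fun sel i => if 1 ≤ i ∧ i ≤ mi then sel.add i else sel) sel ↔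
      x ∈ sel ∨ (x ∈ l ∧ 1 ≤ x ∧ x ≤ mi) := by
  induction l generalizing sel with
  | nil => simp
  | cons h t ih =>
    simp only [List.foldl_cons, ih, List.mem_cons]
    split_ifs with hg
    · simp only [PySem.Set.mem_add]
      constructor
      · rintro ((hs | rfl) | ⟨hm, hb⟩)
        · exact Or.inl hs
        · exact Or.inr ⟨Or.inl rfl, hg⟩
        · exact Or.inr ⟨Or.inr hm, hb⟩
      · rintro (hs | ⟨(rfl | hm), hb⟩)
        · exact Or.inl (Or.inl hs)
        · exact Or.inl (Or.inr rfl)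
        · exact Or.inr ⟨hm, hb⟩
    · constructor
      · rintro (hs | ⟨hm, hb⟩)
        · exact Or.inl hs
        · exact Or.inr ⟨Or.inr hm, hb⟩
      · rintro (hs | ⟨(rfl | hm), hb⟩)
        · exact Or.inl hs
        · exact absurd hb hg
        · exact Or.inr ⟨hm, hb⟩

theorem pv_nodup_guard_fold (mi : Int) (l : List Int) (sel : PySem.Set Int)
    (h : sel.Nodup) :
    (l.foldl (fun sel i => if 1 ≤ i ∧ i ≤ mi then sel.add i else sel) sel).Nodup := by
  induction l generalizing sel with
  | nil => exact h
  | cons a t ih =>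
    simp only [List.foldl_cons]
    split_ifs with hg
    · exact ih _ (PySem.Set.nodup_add _ _ h)
    · exact ih _ h

-- one step of A adds exactly the in-range points of the part's interval
theorem pv_mem_stepA (mi : Int) (sel : PySem.Set Int) (part : String) (x : Int) :
    x ∈ pvStepA mi sel part ↔
      x ∈ sel ∨ (1 ≤ x ∧ x ≤ mi ∧ ∃ lh ∈ pvIval part, lh.1 ≤ x ∧ x ≤ lh.2) := by
  unfold pvStepA pvIval
  split_ifs with hdash
  · cases hsp : (PySem.Str.splitMax? part "-" 1).getD [] with
    | nil => simp
    | cons a rest =>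
      cases rest with
      | nil => simp
      | cons b rest2 =>
        cases rest2 with
        | cons c r3 => simp
        | nil =>
          rcases ha : PySem.Int.ofStr? a with _ | a0 <;>
            rcases hb : PySem.Int.ofStr? b with _ | b0 <;>
              simp only [ha, hb] <;> try simp
          · split_ifs with hcmp <;>
            · simp only [pv_mem_guard_fold, PySem.List.mem_pyRange_one,
                List.mem_singleton]
              constructor
              · rintro (hs | ⟨⟨hl, hr⟩, h1, h2⟩)
                · exact Or.inl hs
                · exact Or.inr ⟨h1, h2, _, _, rfl, hl, by omega⟩
              · rintro (hs | ⟨h1, h2, a', b', heq, hl, hr⟩)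
                · exact Or.inl hs
                · injection heq with e1 e2
                  subst e1; subst e2
                  exact Or.inr ⟨⟨hl, by omega⟩, h1, h2⟩
  · cases hv : PySem.Int.ofStr? part with
    | none => simp
    | some v =>
      show (x ∈ if 1 ≤ v ∧ v ≤ mi then sel.add v else sel) ↔ _
      split_ifs with hg
      · simp only [PySem.Set.mem_add, List.mem_singleton]
        constructor
        · rintro (hs | rfl)
          · tauto
          · exact Or.inr ⟨by omega, by omega, ⟨_, rfl, by omega, by omega⟩⟩
        · rintro (hs | ⟨h1, h2, lh, rfl, h3, h4⟩)
          · tauto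
          · omega
      · simp only [List.mem_singleton]
        constructor
        · tauto
        · rintro (hs | ⟨h1, h2, lh, rfl, h3, h4⟩)
          · tauto
          · omega

theorem pv_nodup_stepA (mi : Int) (sel : PySem.Set Int) (part : String)
    (h : sel.Nodup) : (pvStepA mi sel part).Nodup := by
  unfold pvStepA
  split_ifs with hdash
  · cases hsp : (PySem.Str.splitMax? part "-" 1).getD [] with
    | nil => exact h
    | cons a rest =>
      cases rest with
      | nil => exact h
      | cons b rest2 =>
        cases rest2 with
        | cons c r3 => exact h
        | nil =>
          rcases ha : PySem.Int.ofStr? a with _ | a0 <;>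
            rcases hb : PySem.Int.ofStr? b with _ | b0 <;> simp only [ha, hb] <;>
              first
                | exact h
                | exact pv_nodup_guard_fold _ _ _ h
  · cases hv : PySem.Int.ofStr? part with
    | none => exact h
    | some v =>
      show (if 1 ≤ v ∧ v ≤ mi then sel.add v else sel).Nodup
      split_ifs with hg
      · exact PySem.Set.nodup_add _ _ h
      · exact h

-- membership in A's whole parts fold
theorem pv_mem_foldA (mi : Int) (parts : List String) (sel : PySem.Set Int) (x : Int) :
    x ∈ parts.foldl (pvStepA mi) sel ↔
      x ∈ sel ∨ (1 ≤ x ∧ x ≤ mi ∧ ∃ p ∈ parts, ∃ lh ∈ pvIval p, lh.1 ≤ x ∧ x ≤ lh.2) := by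
  induction parts generalizing sel with
  | nil => simp
  | cons p t ih =>
    simp only [List.foldl_cons, ih, pv_mem_stepA, List.mem_cons]
    constructor
    · rintro ((hs | ⟨h1, h2, lh, hm, h3⟩) | ⟨h1, h2, q, hq, lh, hm, h3⟩)
      · tauto
      · exact Or.inr ⟨h1, h2, p, Or.inl rfl, lh, hm, h3⟩
      · exact Or.inr ⟨h1, h2, q, Or.inr hq, lh, hm, h3⟩
    · rintro (hs | ⟨h1, h2, q, (rfl | hq), lh, hm, h3⟩)
      · tauto
      · exact Or.inl (Or.inr ⟨h1, h2, lh, hm, h3⟩)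
      · exact Or.inr ⟨h1, h2, q, hq, lh, hm, h3⟩

theorem pv_nodup_foldA (mi : Int) (parts : List String) (sel : PySem.Set Int)
    (h : sel.Nodup) : (parts.foldl (pvStepA mi) sel).Nodup := by
  induction parts generalizing sel with
  | nil => exact h
  | cons p t ih => exact ih _ (pv_nodup_stepA _ _ _ h)

-- pvIval returns at most one interval; membership determines it
theorem pvIval_eq_of_mem (part : String) (lh : Int × Int) (h : lh ∈ pvIval part) :
    pvIval part = [lh] := by
  unfold pvIval at h ⊢
  split_ifs at h ⊢ with hdash
  · rcases hsp : (PySem.Str.splitMax? part "-" 1).getD [] with _ | ⟨a, _ | ⟨b, _ | _⟩⟩ <;>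
      simp only [hsp] at h ⊢ <;> try simp at h
    rcases ha : PySem.Int.ofStr? a with _ | a0 <;> rcases hb : PySem.Int.ofStr? b with _ | b0 <;>
      simp only [ha, hb] at h ⊢ <;> try simp at h
    split_ifs at h ⊢ <;> simp_all
  · rcases hv : PySem.Int.ofStr? part with _ | v <;> simp only [hv] at h ⊢ <;> simp_all

-- one step of B appends the clipped interval of its piece (when any)
theorem pv_mem_stepB (mi : Int) (acc : List (Int × Int)) (piece : String) (iv : Int × Int) :
    iv ∈ pvStepB mi acc piece ↔
      iv ∈ acc ∨ (PySem.Str.len (PySem.Str.strip piece) ≠ 0 ∧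
        ∃ lo hi, pvIval (PySem.Str.strip piece) = [(lo, hi)] ∧ max lo 1 ≤ min hi mi ∧
          iv = (max lo 1, min hi mi)) := by
  simp only [pvStepB]
  split_ifs with hz
  · simp
    exact fun hc => absurd (by simpa using hz) hc
  · cases hIv : pvIval (PySem.Str.strip piece) with
    | nil => simp
    | cons lh rest =>
      cases rest with
      | cons lh2 r =>
        dsimp only
        simp
      | nil =>
        obtain ⟨lo, hi⟩ := lh
        dsimp only
        split_ifs with hcl
        · simp only [List.mem_append, List.mem_singleton, List.cons.injEq,
            Prod.mk.injEq, and_true]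
          constructor
          · rintro (hr | rfl)
            · exact Or.inl hr
            · exact Or.inr ⟨by simpa using hz, lo, hi, ⟨rfl, rfl⟩, hcl, rfl⟩
          · rintro (hr | ⟨-, lo', hi', ⟨rfl, rfl⟩, hcl', heq⟩)
            · exact Or.inl hr
            · exact Or.inr heq
        · simp only [List.cons.injEq, Prod.mk.injEq, and_true]
          constructor
          · exact Or.inl
          · rintro (hr | ⟨-, lo', hi', ⟨rfl, rfl⟩, hcl', heq⟩)
            · exact hr
            · exact absurd hcl' hcl

-- membership in B's interval-collecting fold
theorem pv_mem_foldB (mi : Int) (pieces : List String) (acc : List (Int × Int)) (iv : Int × Int) :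
    iv ∈ pieces.foldl (pvStepB mi) acc ↔
      iv ∈ acc ∨ ∃ q ∈ pieces, PySem.Str.len (PySem.Str.strip q) ≠ 0 ∧
        ∃ lo hi, pvIval (PySem.Str.strip q) = [(lo, hi)] ∧ max lo 1 ≤ min hi mi ∧
          iv = (max lo 1, min hi mi) := by
  induction pieces generalizing acc with
  | nil => simp
  | cons q t ih =>
    simp only [List.foldl_cons, ih, pv_mem_stepB, List.mem_cons]
    constructor
    · rintro ((hr | hq) | ⟨p, hp, hrest⟩)
      · exact Or.inl hr
      · exact Or.inr ⟨q, Or.inl rfl, hq⟩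
      · exact Or.inr ⟨p, Or.inr hp, hrest⟩
    · rintro (hr | ⟨p, (rfl | hp), hrest⟩)
      · exact Or.inl (Or.inl hr)
      · exact Or.inl (Or.inr hrest)
      · exact Or.inr ⟨p, hp, hrest⟩

-- membership in B's sweep over intervals sorted by left end
theorem pv_sweep_mem (ivs : List (Int × Int))
    (hs : ivs.Pairwise (fun p q => p.1 ≤ q.1)) (res : List Int) (cur x : Int) :
    x ∈ (ivs.foldl pvSweepStep (res, cur)).1 ↔
      x ∈ res ∨ (cur < x ∧ ∃ iv ∈ ivs, iv.1 ≤ x ∧ x ≤ iv.2) := by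
  induction ivs generalizing res cur with
  | nil => simp
  | cons p t ih =>
    rcases List.pairwise_cons.mp hs with ⟨hhead, htail⟩
    simp only [List.foldl_cons, pvSweepStep]
    rw [ih htail]
    simp only [List.mem_append, PySem.List.mem_pyRange_one, List.mem_cons]
    constructor
    · rintro ((hr | hrange) | ⟨hcur, iv, hiv, h1, h2⟩)
      · exact Or.inl hr
      · exact Or.inr ⟨by omega, p, Or.inl rfl, by omega, by omega⟩
      · exact Or.inr ⟨by omega, iv, Or.inr hiv, h1, h2⟩
    · rintro (hr | ⟨hcur, iv, (rfl | hiv), h1, h2⟩)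
      · exact Or.inl (Or.inl hr)
      · exact Or.inl (Or.inr ⟨by omega, by omega⟩)
      · by_cases hle : x ≤ p.2
        · exact Or.inl (Or.inr ⟨by have := hhead iv hiv; omega, by omega⟩)
        · exact Or.inr ⟨by omega, iv, hiv, h1, h2⟩

-- the sweep emits a strictly increasing list
theorem pv_sweep_pairwise (ivs : List (Int × Int)) (res : List Int) (cur : Int)
    (hres : res.Pairwise (· < ·)) (hub : ∀ y ∈ res, y ≤ cur) :
    ((ivs.foldl pvSweepStep (res, cur)).1).Pairwise (· < ·) := by
  induction ivs generalizing res cur with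
  | nil => exact hres
  | cons p t ih =>
    simp only [List.foldl_cons, pvSweepStep]
    apply ih
    · refine List.pairwise_append.mpr ⟨hres, PySem.List.pairwise_lt_pyRange_one _ _, ?_⟩
      intro y hy z hz
      have h1 := hub y hy
      have h2 := (PySem.List.mem_pyRange_one.mp hz).1
      omega
    · intro y hy
      rcases List.mem_append.mp hy with h | h
      · have := hub y h; omega
      · have := (PySem.List.mem_pyRange_one.mp h).2; omega

-- the core equality, stated on the raw split pieces
theorem pv_core (mi : Int) (pieces : List String) :
    PySem.List.sorted
      (((pieces.map PySem.Str.strip).filter (fun p => PySem.Str.len p ≠ 0)).foldl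
        (pvStepA mi) PySem.Set.empty) (fun x => x) =
    ((PySem.List.sorted (pieces.foldl (pvStepB mi) []) (fun iv => iv.1)).foldl
      pvSweepStep ([], 0)).1 := by
  have hs := PySem.List.sorted_pairwise (xs := pieces.foldl (pvStepB mi) []) (key := fun iv => iv.1)
  have hpw := pv_sweep_pairwise (PySem.List.sorted (pieces.foldl (pvStepB mi) []) (fun iv => iv.1))
    [] 0 (by simp) (by simp)
  apply PySem.List.sorted_eq_of_perm_of_pairwise_lt
  · rw [List.perm_ext_iff_of_nodup (hpw.imp fun h => ne_of_lt h)
      (pv_nodup_foldA mi _ _ (by simp [PySem.Set.empty]))]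
    intro x
    rw [pv_sweep_mem _ hs, pv_mem_foldA]
    simp only [PySem.Set.empty, List.not_mem_nil, false_or, PySem.List.mem_sorted,
      pv_mem_foldB, List.mem_filter, List.mem_map]
    constructor
    · rintro ⟨hx0, iv, ⟨q, hq, hz, lo, hi, hIv, hcl, rfl⟩, hx1, hx2⟩
      refine ⟨by omega, by simp at hx2; omega, PySem.Str.strip q,
        ⟨⟨q, hq, rfl⟩, decide_eq_true hz⟩, (lo, hi), by simp [hIv], by simp at hx1; omega,
        by simp at hx2; omega⟩
    · rintro ⟨h1, h2, p, ⟨⟨q, hq, rfl⟩, hz⟩, lh, hm, h3, h4⟩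
      have hIv := pvIval_eq_of_mem _ _ hm
      refine ⟨by omega, (max lh.1 1, min lh.2 mi),
        ⟨q, hq, of_decide_eq_true hz, lh.1, lh.2, by simpa using hIv, by omega, rfl⟩,
        by simp; omega, by simp; omega⟩
  · exact hpw

-- ===== VERDICT (by name: the statement is the Claim_ definition above) =====
theorem parse_selection_input_spec : Claim_equal_parse_selection_input := by
  intro user_input max_index _
  simp only [Spec_parse_selection_input, parse_selection_input, parse_selection_input_alt]
  split_ifs with h0 hall
  · rfl
  · rfl
  · exact pv_core max_index _
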